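-- pv_equiv track=rewrite | github.com/gene-kira/Psychic-Mind | Engene pen data.py | pre_decode_patterns
-- ===== SOURCE A (Python) =====
-- def pre_decode_patterns(shards, pattern_id, seed=None, perm=None):
--     if pattern_id == "base":
--         S1, S3, S2, S4 = shards
--         return [S1, S2, S3, S4]
--     if pattern_id == "reverse":
--         S4, S3, S2, S1 = shards
--         return [S1, S2, S3, S4]
--     if pattern_id == "swap":
--         S2, S1, S4, S3 = shards
--         return [S1, S2, S3, S4]
--     if pattern_id == "rotate":
--         S2, S3, S4, S1 = shards
--         return [S1, S2, S3, S4]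
--     if pattern_id == "random" and perm is not None:
--         inv = [None] * 4
--         for i, p in enumerate(perm):
--             inv[p] = shards[i]
--         return inv
--     S1, S3, S2, S4 = shards
--     return [S1, S2, S3, S4]
-- ===== SOURCE B (Python) =====
-- # Every arrangement (named or random) is reduced to one mechanism: tag each shard
-- # with its destination slot and sort the tagged pairs by slot.
-- _DEST = {
--     "base": [0, 2, 1, 3],
--     "reverse": [3, 2, 1, 0],
--     "swap": [1, 0, 3, 2],
--     "rotate": [1, 2, 3, 0],
-- }
--
-- def pre_decode_patterns(shards, pattern_id, seed=None, perm=None):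
--     if pattern_id != "random" or perm is None:
--         s1, s2, s3, s4 = shards  # same ValueError as A on a wrong-length input
--         shards = [s1, s2, s3, s4]
--         perm = _DEST.get(pattern_id, [0, 2, 1, 3])
--     return [s for _, s in sorted(zip(perm, shards), key=lambda t: t[0])]
-- ===== Notes on version B (the rewrite author's own statement) =====
-- stated objective: alternative
-- what changed: Instead of A's per-pattern tuple re-unpackings plus an inverse-fill mutation loop, B reduces every arrangement to one sort-based mechanism: each shard is tagged with its destination slot (from a small table, or the given perm) and the tagged pairs are sorted by slot.
-- outside the precondition, e.g. on pre_decode_patterns(['random'], 'random', 6, [0]): A returns ['random', None, None, None], B returns ['random']; on pre_decode_patterns(['a', 'b'], 'random', None, [0, 0]): A returns ['b', None, None, None], B returns ['a', 'b']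
import Mathlib
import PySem

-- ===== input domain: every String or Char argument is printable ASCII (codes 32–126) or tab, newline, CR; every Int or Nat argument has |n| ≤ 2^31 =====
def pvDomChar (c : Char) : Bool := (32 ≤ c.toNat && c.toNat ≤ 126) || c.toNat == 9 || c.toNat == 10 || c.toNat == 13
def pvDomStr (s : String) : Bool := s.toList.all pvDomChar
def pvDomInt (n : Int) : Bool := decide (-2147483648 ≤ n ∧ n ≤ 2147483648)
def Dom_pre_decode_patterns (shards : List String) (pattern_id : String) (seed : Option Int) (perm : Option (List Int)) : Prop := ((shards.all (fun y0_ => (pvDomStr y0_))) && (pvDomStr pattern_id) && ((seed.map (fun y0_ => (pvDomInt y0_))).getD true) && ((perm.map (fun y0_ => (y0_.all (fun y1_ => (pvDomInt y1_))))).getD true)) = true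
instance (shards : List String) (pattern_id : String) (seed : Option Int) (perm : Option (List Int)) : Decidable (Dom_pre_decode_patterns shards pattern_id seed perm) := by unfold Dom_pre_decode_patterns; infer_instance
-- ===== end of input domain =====

-- B replaces A's per-pattern tuple re-unpackings and inverse-fill loop by one mechanism:
-- tag each shard with its destination slot and sort the tagged pairs by slot.
-- ===== PORT A =====
-- each 4-tuple unpack 'S_, S_, S_, S_ = shards' is a match on a 4-element list; a failed
-- unpack is Python's ValueError (outside Pre_), rendered as [].
def pre_decode_patterns (shards : List String) (pattern_id : String) (_seed : Option Int) (perm : Option (List Int)) : List String :=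
  if pattern_id = "base" then
    match shards with
    | [s1, s3, s2, s4] => [s1, s2, s3, s4]
    | _ => []
  else if pattern_id = "reverse" then
    match shards with
    | [s4, s3, s2, s1] => [s1, s2, s3, s4]
    | _ => []
  else if pattern_id = "swap" then
    match shards with
    | [s2, s1, s4, s3] => [s1, s2, s3, s4]
    | _ => []
  else if pattern_id = "rotate" then
    match shards with
    | [s2, s3, s4, s1] => [s1, s2, s3, s4]
    | _ => []
  else if pattern_id = "random" ∧ perm.isSome then
    match perm with
    | some l =>
      -- inv = [None]*4; for i, p in enumerate(perm): inv[p] = shards[i]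
      -- inv : List (Option String); inv[p]=x with -4 ≤ p < 0 wraps (j = p+4); out-of-range p is
      -- Python's IndexError and a leftover None is not a string (both outside Pre_), rendered "".
      let inv : List (Option String) := [none, none, none, none]
      let inv := (PySem.List.enumerate l 0).foldl
        (fun (inv : List (Option String)) ip =>
          let j : Int := if ip.2 < 0 then ip.2 + 4 else ip.2
          inv.set j.toNat (PySem.List.pyGet? shards ip.1)) inv
      inv.map (fun o => o.getD "")
    | none => []
  else
    match shards with
    | [s1, s3, s2, s4] => [s1, s2, s3, s4]
    | _ => []

-- ===== PORT B =====
-- the module-level destination table _DEST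
def pvDest : PySem.Dict String (List Int) :=
  PySem.Dict.ofList [("base", [0, 2, 1, 3]), ("reverse", [3, 2, 1, 0]), ("swap", [1, 0, 3, 2]), ("rotate", [1, 2, 3, 0])]

-- the 4-unpack 's1, s2, s3, s4 = shards': some [s1,s2,s3,s4] on a 4-element list, none is
-- Python's ValueError (outside Pre_), rendered below as [].
def pvUnpack4 (xs : List String) : Option (List String) :=
  if xs.length = 4 then some xs else none

def pre_decode_patterns_alt (shards : List String) (pattern_id : String) (_seed : Option Int) (perm : Option (List Int)) : List String :=
  if pattern_id ≠ "random" ∨ perm = none then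
    -- [s for _, s in sorted(zip(perm, shards), key=lambda t: t[0])]
    ((pvUnpack4 shards).map (fun sh =>
      (PySem.List.sorted ((pvDest.getD pattern_id [0, 2, 1, 3]).zip sh) (fun t => t.1) false).map (fun t => t.2))).getD []
  else
    (PySem.List.sorted (((perm.getD []) : List Int).zip shards) (fun t => t.1) false).map (fun t => t.2)

-- ===== PRECONDITION & SPEC =====
-- Pre_ excludes inputs where A raises (shards not unpackable as 4 on the named/default path;
-- random shards shorter than perm) and random perms that are not exactly a permutation of
-- [0,1,2,3]: there A's negative-index wraparound, None cells (not strings) and last-write-wins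
-- on duplicate slots are accidental.
def Pre_pre_decode_patterns (shards : List String) (pattern_id : String) (seed : Option Int) (perm : Option (List Int)) : Prop :=
  if pattern_id = "random" ∧ perm.isSome then
    (perm.getD []).Perm [0, 1, 2, 3] ∧ 4 ≤ shards.length
  else shards.length = 4
instance (shards : List String) (pattern_id : String) (seed : Option Int) (perm : Option (List Int)) : Decidable (Pre_pre_decode_patterns shards pattern_id seed perm) := by unfold Pre_pre_decode_patterns; infer_instance

def pvWitness_pre_decode_patterns : List String × String × Option Int × Option (List Int) :=
  (["a", "b", "c", "d"], "random", none, some [2, 0, 3, 1])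

def Spec_pre_decode_patterns (shards : List String) (pattern_id : String) (seed : Option Int) (perm : Option (List Int)) (out : List String) : Prop := out = pre_decode_patterns_alt shards pattern_id seed perm
instance (shards : List String) (pattern_id : String) (seed : Option Int) (perm : Option (List Int)) (out : List String) : Decidable (Spec_pre_decode_patterns shards pattern_id seed perm out) := by unfold Spec_pre_decode_patterns; infer_instance

-- ===== CLAIM (what is proved, stated in full; the proofs are below) =====
def Claim_equal_pre_decode_patterns : Prop := ∀ (shards : List String) (pattern_id : String) (seed : Option Int) (perm : Option (List Int)), Dom_pre_decode_patterns shards pattern_id seed perm → Pre_pre_decode_patterns shards pattern_id seed perm → Spec_pre_decode_patterns shards pattern_id seed perm (pre_decode_patterns shards pattern_id seed perm)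

-- ===== LEMMAS AND PROOFS =====

-- the named/default part: on a 4-element list, A's if-chain equals B's tag-and-sort
lemma dispatch_eq (a b c d : String) (pid : String) (seed : Option Int)
    (perm : Option (List Int)) (hr : ¬(pid = "random" ∧ perm.isSome)) :
    pre_decode_patterns [a, b, c, d] pid seed perm = pre_decode_patterns_alt [a, b, c, d] pid seed perm := by
  have hofl : pvDest = (((PySem.Dict.empty.insert "base" [0, 2, 1, 3]).insert "reverse" [3, 2, 1, 0]).insert "swap" [1, 0, 3, 2]).insert "rotate" [1, 2, 3, 0] := rfl
  have hb : (pid ≠ "random" ∨ perm = none) := by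
    rcases perm with _ | l
    · exact Or.inr rfl
    · exact Or.inl (fun h => hr ⟨h, rfl⟩)
  by_cases h1 : pid = "base" <;> by_cases h2 : pid = "reverse" <;>
    by_cases h3 : pid = "swap" <;> by_cases h4 : pid = "rotate" <;>
    by_cases h5 : pid = "random" <;>
    simp_all [pre_decode_patterns, pre_decode_patterns_alt, hofl,
      PySem.Dict.getD_insert, PySem.Dict.getD_empty] <;>
    rfl

-- the random part: with perm an exact permutation of [0,1,2,3], A's inverse fill equals B's sort
lemma random_eq (s0 s1 s2 s3 : String) (rest : List String) (l : List Int)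
    (hperm : l.Perm [0, 1, 2, 3]) (seed : Option Int) :
    pre_decode_patterns (s0 :: s1 :: s2 :: s3 :: rest) "random" seed (some l)
      = pre_decode_patterns_alt (s0 :: s1 :: s2 :: s3 :: rest) "random" seed (some l) := by
  have h0 : PySem.List.pyGet? (s0 :: s1 :: s2 :: s3 :: rest) 0 = some s0 :=
    PySem.List.pyGet?_zero_cons _ _
  have h1 : PySem.List.pyGet? (s0 :: s1 :: s2 :: s3 :: rest) 1 = some s1 := by
    rw [PySem.List.pyGet?_of_nonneg] <;> first | rfl | norm_num
  have h2 : PySem.List.pyGet? (s0 :: s1 :: s2 :: s3 :: rest) 2 = some s2 := by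
    rw [PySem.List.pyGet?_of_nonneg] <;> first | rfl | norm_num
  have h3 : PySem.List.pyGet? (s0 :: s1 :: s2 :: s3 :: rest) 3 = some s3 := by
    rw [PySem.List.pyGet?_of_nonneg] <;> first | rfl | norm_num
  have hl : l ∈ ([0, 1, 2, 3] : List Int).permutations' := List.mem_permutations'.mpr hperm
  have hps : (([0, 1, 2, 3] : List Int).permutations') =
      [[0, 1, 2, 3], [1, 0, 2, 3], [1, 2, 0, 3], [1, 2, 3, 0], [0, 2, 1, 3], [2, 0, 1, 3],
       [2, 1, 0, 3], [2, 1, 3, 0], [0, 2, 3, 1], [2, 0, 3, 1], [2, 3, 0, 1], [2, 3, 1, 0],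
       [0, 1, 3, 2], [1, 0, 3, 2], [1, 3, 0, 2], [1, 3, 2, 0], [0, 3, 1, 2], [3, 0, 1, 2],
       [3, 1, 0, 2], [3, 1, 2, 0], [0, 3, 2, 1], [3, 0, 2, 1], [3, 2, 0, 1], [3, 2, 1, 0]] := by
    decide
  rw [hps] at hl
  simp only [List.mem_cons, List.not_mem_nil, or_false] at hl
  rcases hl with rfl | rfl | rfl | rfl | rfl | rfl | rfl | rfl | rfl | rfl | rfl | rfl |
    rfl | rfl | rfl | rfl | rfl | rfl | rfl | rfl | rfl | rfl | rfl | rfl <;>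
    (simp [pre_decode_patterns, PySem.List.enumerate, h0, h1, h2, h3]) <;> rfl

-- ===== VERDICT (by name: the statement is the Claim_ definition above) =====
theorem pre_decode_patterns_spec : Claim_equal_pre_decode_patterns := by
  intro shards pid seed perm _ hpre
  unfold Spec_pre_decode_patterns
  unfold Pre_pre_decode_patterns at hpre
  by_cases hr : pid = "random" ∧ perm.isSome
  · rw [if_pos hr] at hpre
    obtain ⟨hpid, hs⟩ := hr
    rcases perm with _ | l
    · simp at hs
    · obtain ⟨hperm, hlen⟩ := hpre
      simp only [Option.getD_some] at hperm
      obtain ⟨s0, s1, s2, s3, rest, rfl⟩ :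
          ∃ a b c d t, shards = a :: b :: c :: d :: t := by
        rcases shards with _ | ⟨a, _ | ⟨b, _ | ⟨c, _ | ⟨d, t⟩⟩⟩⟩ <;> simp_all
      subst hpid
      exact random_eq s0 s1 s2 s3 rest l hperm seed
  · rw [if_neg hr] at hpre
    obtain ⟨a, b, c, d, rfl⟩ : ∃ a b c d, shards = [a, b, c, d] := by
      rcases shards with _ | ⟨a, _ | ⟨b, _ | ⟨c, _ | ⟨d, _ | _⟩⟩⟩⟩ <;> simp_all
    exact dispatch_eq a b c d pid seed perm hr
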